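-- pv_equiv track=rewrite | github.com/MichaelLTsai/StanCodeProjects | Stan_Code_Projects/5_anagram_puzzle_solver/anagram.py | qty_cmp
-- ===== SOURCE A (Python) =====
-- def qty_cmp(ch_counter, dict_s):
--     """
--     :param ch_counter:
--     :param dict_s:
--     :return:
--     """
--     curr_counter = {}
--     for ch in dict_s:
--         if ch in curr_counter:
--             curr_counter[ch] += 1
--         else:
--             curr_counter[ch] = 1
--         if ch not in ch_counter:
--             return False
--         elif curr_counter[ch] > ch_counter[ch]:
--             return False
--     return True
-- ===== SOURCE B (Python) =====
-- def qty_cmp(ch_counter, dict_s):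
--     # Sort the characters, then scan runs of equal characters: each run's length
--     # is that character's total count, checked against ch_counter.
--     s = sorted(dict_s)
--     i = 0
--     while i < len(s):
--         j = i + 1
--         while j < len(s) and s[j] == s[i]:
--             j += 1
--         if s[i] not in ch_counter or j - i > ch_counter[s[i]]:
--             return False
--         i = j
--     return True
-- ===== Notes on version B (the rewrite author's own statement) =====
-- stated objective: alternative
-- what changed: A counts characters in a dict interleaved with per-character checks; B builds no dict at all: it sorts the characters and scans runs of equal adjacent characters, comparing each run length against ch_counter.
import Mathlib
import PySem

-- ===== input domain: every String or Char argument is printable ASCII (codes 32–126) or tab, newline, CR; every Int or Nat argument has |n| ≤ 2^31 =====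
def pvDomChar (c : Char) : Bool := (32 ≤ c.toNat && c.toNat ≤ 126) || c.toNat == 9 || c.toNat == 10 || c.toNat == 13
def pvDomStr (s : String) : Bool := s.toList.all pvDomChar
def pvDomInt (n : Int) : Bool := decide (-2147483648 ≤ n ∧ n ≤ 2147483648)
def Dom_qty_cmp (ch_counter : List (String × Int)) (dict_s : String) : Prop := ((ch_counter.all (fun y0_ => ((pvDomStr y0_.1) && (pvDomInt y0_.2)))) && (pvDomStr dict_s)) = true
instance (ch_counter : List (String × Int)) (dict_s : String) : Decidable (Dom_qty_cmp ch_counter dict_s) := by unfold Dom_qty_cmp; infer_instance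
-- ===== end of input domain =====

-- B replaces A's dict-counting early-exit pass by a sort-then-run-length scan (no dict
-- of counts at all): alternative algorithm, not claimed faster.

-- ===== PORT A =====
-- the two-branch counter increment of A's loop body
def qtyStep (curr : PySem.Dict String Int) (s : String) : PySem.Dict String Int :=
  if curr.contains s then curr.insert s (curr.getD s 0 + 1) else curr.insert s 1

-- A's loop over the characters of dict_s, carrying the running counter; the two early
-- `return False` branches become the `false` results.
def qtyCmpLoop (cc : List (String × Int)) (curr : PySem.Dict String Int) : List Char → Bool
  | [] => true
  | c :: rest =>
    let s := String.ofList [c]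
    let curr' := qtyStep curr s
    match cc.lookup s with
    | none => false                                   -- `if ch not in ch_counter: return False`
    | some m =>
      if curr'.getD s 0 > m then false                -- `elif curr_counter[ch] > ch_counter[ch]: return False`
      else qtyCmpLoop cc curr' rest

def qty_cmp (ch_counter : List (String × Int)) (dict_s : String) : Bool :=
  qtyCmpLoop ch_counter PySem.Dict.empty dict_s.toList

-- ===== PORT B =====
-- B's inner while loop: length of the run of `c` at the front, and the remainder
def runSplit (c : Char) : List Char → Nat × List Char
  | [] => (0, [])
  | x :: xs => if x = c then ((runSplit c xs).1 + 1, (runSplit c xs).2) else (0, x :: xs)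

theorem runSplit_len (c : Char) (l : List Char) : (runSplit c l).2.length ≤ l.length := by
  induction l with
  | nil => simp [runSplit]
  | cons x xs ih => by_cases h : x = c <;> simp [runSplit, h] <;> omega

-- B's outer while loop over the sorted character list
def qtyAltLoop (cc : List (String × Int)) : List Char → Bool
  | [] => true
  | c :: rest =>
    match cc.lookup (String.ofList [c]) with
    | none => false                                   -- `s[i] not in ch_counter`
    | some m =>
      if ((runSplit c rest).1 + 1 : Int) > m then false   -- `j - i > ch_counter[s[i]]`
      else qtyAltLoop cc (runSplit c rest).2
termination_by l => l.length
decreasing_by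
  have := runSplit_len c rest; simp; omega

def qty_cmp_alt (ch_counter : List (String × Int)) (dict_s : String) : Bool :=
  qtyAltLoop ch_counter (PySem.List.sorted dict_s.toList (fun c => c) false)

-- ===== PRECONDITION & SPEC =====
def Spec_qty_cmp (ch_counter : List (String × Int)) (dict_s : String) (out : Bool) : Prop := out = qty_cmp_alt ch_counter dict_s
instance (ch_counter : List (String × Int)) (dict_s : String) (out : Bool) : Decidable (Spec_qty_cmp ch_counter dict_s out) := by unfold Spec_qty_cmp; infer_instance

-- ===== CLAIM (what is proved, stated in full; the proofs are below) =====
def Claim_equal_qty_cmp : Prop := ∀ (ch_counter : List (String × Int)) (dict_s : String), Dom_qty_cmp ch_counter dict_s → Spec_qty_cmp ch_counter dict_s (qty_cmp ch_counter dict_s)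

-- ===== LEMMAS AND PROOFS =====

-- the per-character admissibility check, against a fixed count n
def pvChk (cc : List (String × Int)) (x : String) (n : Int) : Bool :=
  match cc.lookup x with
  | none => false
  | some m => decide (n ≤ m)

theorem pvBool_ext {a b : Bool} (h : a = true ↔ b = true) : a = b := by
  cases a <;> cases b <;> simp_all

theorem pvAll_congr {α : Type} (l : List α) (p q : α → Bool) (h : ∀ x, p x = q x) :
    l.all p = l.all q := by
  induction l with
  | nil => rfl
  | cons a l ih => simp [List.all_cons, h a, ih]

theorem pvMk1_inj : Function.Injective (fun c : Char => String.ofList [c]) := by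
  intro a b h
  have := congrArg String.toList h
  simpa using this

theorem pvStep_getD_self (curr : PySem.Dict String Int) (s : String) :
    (qtyStep curr s).getD s 0 = curr.getD s 0 + 1 := by
  unfold qtyStep
  split_ifs with hcon
  · rw [PySem.Dict.getD_insert, if_pos rfl]
  · rw [PySem.Dict.getD_insert, if_pos rfl]
    have h0 : curr.getD s 0 = 0 := by
      rw [PySem.Dict.getD_eq_get?_getD]
      have hn : curr.get? s = none := by
        rw [PySem.Dict.get?_eq_none_iff_contains]
        simpa using hcon
      rw [hn]
      rfl
    rw [h0]
    omega

theorem pvStep_getD_ne (curr : PySem.Dict String Int) (s t : String) (h : t ≠ s) :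
    (qtyStep curr s).getD t 0 = curr.getD t 0 := by
  unfold qtyStep
  split_ifs <;> rw [PySem.Dict.getD_insert, if_neg h]

-- A's early-exit loop equals the final-count check over every remaining character
theorem pvLoop_eq (cc : List (String × Int)) :
    ∀ (cs : List Char) (curr : PySem.Dict String Int),
      qtyCmpLoop cc curr cs
        = cs.all (fun y => pvChk cc (String.ofList [y])
            (curr.getD (String.ofList [y]) 0 + (cs.count y : Int))) := by
  intro cs
  induction cs with
  | nil => intro curr; simp [qtyCmpLoop]
  | cons c rest ih =>
    intro curr
    have hpt : ∀ y : Char,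
        pvChk cc (String.ofList [y])
            (curr.getD (String.ofList [y]) 0 + ((c :: rest).count y : Int))
          = pvChk cc (String.ofList [y])
            ((qtyStep curr (String.ofList [c])).getD (String.ofList [y]) 0
             + (rest.count y : Int)) := by
      intro y
      by_cases hyc : y = c
      · subst hyc
        rw [pvStep_getD_self]
        congr 1
        rw [List.count_cons]
        simp
        all_goals omega
      · have hne : String.ofList [y] ≠ String.ofList [c] := fun h => hyc (pvMk1_inj h)
        rw [pvStep_getD_ne _ _ _ hne]
        congr 1
        rw [List.count_cons]
        simp [Ne.symm hyc]
    rw [List.all_cons, qtyCmpLoop]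
    cases hl : cc.lookup (String.ofList [c]) with
    | none =>
      simp [pvChk, hl]
    | some m =>
      rw [pvStep_getD_self]
      have hred : (match some m with
          | none => false
          | some m => if curr.getD (String.ofList [c]) 0 + 1 > m then false
              else qtyCmpLoop cc (qtyStep curr (String.ofList [c])) rest)
          = (if curr.getD (String.ofList [c]) 0 + 1 > m then false
              else qtyCmpLoop cc (qtyStep curr (String.ofList [c])) rest) := rfl
      rw [hred]
      by_cases hgt : curr.getD (String.ofList [c]) 0 + 1 > m
      · rw [if_pos hgt]
        have hhead : pvChk cc (String.ofList [c])
            (curr.getD (String.ofList [c]) 0 + (List.count c (c :: rest) : Int)) = false := by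
          simp only [pvChk, hl, decide_eq_false_iff_not]
          rw [List.count_cons]
          simp
          omega
        rw [hhead, Bool.false_and]
      · rw [if_neg hgt, ih]
        have htail := pvAll_congr rest
          (fun y => pvChk cc (String.ofList [y])
            (curr.getD (String.ofList [y]) 0 + (List.count y (c :: rest) : Int)))
          (fun y => pvChk cc (String.ofList [y])
            ((qtyStep curr (String.ofList [c])).getD (String.ofList [y]) 0
             + (List.count y rest : Int)))
          hpt
        rw [htail, hpt c, pvStep_getD_self]
        by_cases hc : c ∈ rest
        · cases hall : rest.all (fun y => pvChk cc (String.ofList [y])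
              ((qtyStep curr (String.ofList [c])).getD (String.ofList [y]) 0
               + (List.count y rest : Int))) with
          | false => simp [hall]
          | true =>
            have h2 : pvChk cc (String.ofList [c])
                ((qtyStep curr (String.ofList [c])).getD (String.ofList [c]) 0
                 + (List.count c rest : Int)) = true :=
              List.all_eq_true.mp hall c hc
            rw [pvStep_getD_self] at h2
            simp [hall, h2]
        · have hcnt : List.count c rest = 0 := List.count_eq_zero.mpr hc
          have hhead : pvChk cc (String.ofList [c])
              (curr.getD (String.ofList [c]) 0 + 1 + (List.count c rest : Int)) = true := by
            simp only [pvChk, hl, hcnt, Nat.cast_zero, add_zero, decide_eq_true_eq]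
            omega
          rw [hhead, Bool.true_and]

-- runSplit splits off exactly the leading run of c
theorem pvRunSplit_spec (c : Char) (l : List Char) :
    l = List.replicate (runSplit c l).1 c ++ (runSplit c l).2
    ∧ (∀ h t, (runSplit c l).2 = h :: t → h ≠ c) := by
  induction l with
  | nil => simp [runSplit]
  | cons x xs ih =>
    by_cases h : x = c
    · subst h
      refine ⟨?_, ?_⟩
      · simp only [runSplit, if_pos rfl, List.replicate_succ, List.cons_append]
        exact congrArg _ ih.1
      · intro h t he
        simp only [runSplit, if_pos rfl] at he
        exact ih.2 h t he
    · exact ⟨by simp [runSplit, h], by intro a t he; simp [runSplit, h] at he; rw [← he.1]; exact h⟩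

-- on a sorted list, B's run-scan loop equals the final-count check over every character
theorem pvAltLoop_eq (cc : List (String × Int)) :
    ∀ (N : Nat) (l : List Char), l.length ≤ N → l.Pairwise (· ≤ ·) →
      qtyAltLoop cc l
        = l.all (fun y => pvChk cc (String.ofList [y]) ((l.count y : Int))) := by
  intro N
  induction N with
  | zero =>
    intro l hlen _
    have : l = [] := List.eq_nil_of_length_eq_zero (Nat.le_zero.mp hlen)
    subst this; simp [qtyAltLoop]
  | succ N ih =>
    intro l hlen hsort
    cases l with
    | nil => simp [qtyAltLoop]
    | cons c rest =>
      obtain ⟨n, rest', hns⟩ : ∃ n rest', runSplit c rest = (n, rest') :=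
        ⟨_, _, rfl⟩
      obtain ⟨hdec, hhd⟩ := pvRunSplit_spec c rest
      rw [hns] at hdec hhd
      simp only at hdec hhd
      -- c ∉ rest'
      have hrest_le : ∀ x ∈ rest, c ≤ x := (List.pairwise_cons.mp hsort).1
      have hsr : rest.Pairwise (· ≤ ·) := (List.pairwise_cons.mp hsort).2
      have hsuffix : rest'.Pairwise (· ≤ ·) := by
        rw [hdec] at hsr
        exact (List.pairwise_append.mp hsr).2.1
      have hcnot : c ∉ rest' := by
        intro hmem
        cases hr' : rest' with
        | nil => rw [hr'] at hmem; simp at hmem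
        | cons h t =>
          rw [hr'] at hmem hsuffix
          have hne : h ≠ c := hhd h t hr'
          have hch : c ≤ h := hrest_le h (by
            rw [hdec, hr']; exact List.mem_append_right _ (by simp))
          rcases List.mem_cons.mp hmem with he | ht
          · exact hne he.symm
          · have := (List.pairwise_cons.mp hsuffix).1 c ht
            exact hne (le_antisymm this hch)
      -- counts in the full list
      have hcount_c : (c :: rest).count c = n + 1 := by
        rw [List.count_cons_self, hdec, List.count_append]
        simp [List.count_replicate, List.count_eq_zero.mpr hcnot]
      have hcount_y : ∀ y ∈ rest', (c :: rest).count y = rest'.count y := by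
        intro y hy
        have hyc : y ≠ c := fun he => hcnot (he ▸ hy)
        have hcy : ¬ c = y := fun he => hyc he.symm
        simp [hdec, List.count_cons, List.count_append, List.count_replicate, hcy]
      have hcastc : ((List.count c (c :: rest) : Int)) = (n : Int) + 1 := by
        rw [hcount_c]; push_cast; ring
      -- the all over the full list factors
      have hfact : (c :: rest).all (fun y => pvChk cc (String.ofList [y]) (((c :: rest).count y : Int)))
          = (pvChk cc (String.ofList [c]) ((n : Int) + 1)
              && rest'.all (fun y => pvChk cc (String.ofList [y]) ((rest'.count y : Int)))) := by
        apply pvBool_ext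
        simp only [List.all_cons, Bool.and_eq_true, List.all_eq_true]
        constructor
        · rintro ⟨hc1, hr1⟩
          refine ⟨by rwa [hcastc] at hc1, ?_⟩
          intro y hy
          have := hr1 y (by rw [hdec]; exact List.mem_append_right _ hy)
          rwa [hcount_y y hy] at this
        · rintro ⟨hc1, hr1⟩
          refine ⟨by rwa [hcastc], ?_⟩
          intro y hy
          rw [hdec] at hy
          rcases List.mem_append.mp hy with hrep | hy'
          · have he : y = c := List.eq_of_mem_replicate hrep
            subst he
            rwa [hcastc]
          · rw [hcount_y y hy']
            exact hr1 y hy'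
      -- unfold one step of the loop
      rw [hfact]
      rw [qtyAltLoop]
      cases hl : cc.lookup (String.ofList [c]) with
      | none => simp [pvChk, hl]
      | some m =>
        simp only [hns]
        by_cases hgt : ((n : Int) + 1 > m)
        · rw [if_pos hgt]
          have : pvChk cc (String.ofList [c]) ((n : Int) + 1) = false := by
            simp only [pvChk, hl, decide_eq_false_iff_not]; omega
          rw [this, Bool.false_and]
        · rw [if_neg hgt]
          have hlen' : rest'.length ≤ N := by
            have h1 : rest'.length ≤ rest.length := by
              rw [hdec]; simp
            simp at hlen; omega
          rw [ih rest' hlen' hsuffix]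
          have : pvChk cc (String.ofList [c]) ((n : Int) + 1) = true := by
            simp only [pvChk, hl, decide_eq_true_eq]; omega
          rw [this, Bool.true_and]

-- ===== VERDICT (by name: the statement is the Claim_ definition above) =====
theorem qty_cmp_spec : Claim_equal_qty_cmp := by
  intro cc ds _
  unfold Spec_qty_cmp qty_cmp qty_cmp_alt
  rw [pvLoop_eq]
  have hperm : (PySem.List.sorted ds.toList (fun c => c) false).Perm ds.toList :=
    PySem.List.sorted_perm ds.toList (fun c => c) false
  have hsort : (PySem.List.sorted ds.toList (fun c => c) false).Pairwise (· ≤ ·) :=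
    PySem.List.sorted_pairwise ds.toList (fun c => c)
  rw [pvAltLoop_eq cc (PySem.List.sorted ds.toList (fun c => c) false).length _ le_rfl hsort]
  have h1 : ds.toList.all (fun y => pvChk cc (String.ofList [y])
      (PySem.Dict.empty.getD (String.ofList [y]) 0 + (ds.toList.count y : Int)))
      = ds.toList.all (fun y => pvChk cc (String.ofList [y]) ((ds.toList.count y : Int))) := by
    apply pvAll_congr; intro y; simp [PySem.Dict.getD_empty]
  rw [h1]
  have h2 : (PySem.List.sorted ds.toList (fun c => c) false).all
      (fun y => pvChk cc (String.ofList [y])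
        (((PySem.List.sorted ds.toList (fun c => c) false).count y : Int)))
      = (PySem.List.sorted ds.toList (fun c => c) false).all
      (fun y => pvChk cc (String.ofList [y]) ((ds.toList.count y : Int))) := by
    apply pvAll_congr; intro y; rw [hperm.count_eq]
  rw [h2, hperm.all_eq]
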